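-- pv_equiv track=rewrite | github.com/yeastgenome/PatmatchDocker | www/app/pattern_converter.py | _extract_repetition_info
-- ===== SOURCE A (Python) =====
-- def _extract_repetition_info(chars: list) -> str:
--     """Extract repetition info from chars, removing the {info part."""
--     rep_info = []
--     while chars:
--         char = chars.pop()
--         if char == '{':
--             break
--         rep_info.insert(0, char)
--     return ''.join(rep_info)
-- ===== SOURCE B (Python) =====
-- def _extract_repetition_info(chars: list) -> str:
--     """Extract repetition info from chars, removing the {info part."""
--     pos = None
--     for i, c in enumerate(chars):
--         if c == '{':
--             pos = i
--     if pos is None: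
--         result = ''.join(chars)
--         chars.clear()
--     else:
--         result = ''.join(chars[pos + 1:])
--         del chars[pos:]
--     return result
-- ===== Notes on version B (the rewrite author's own statement) =====
-- stated objective: idiomatic
-- what changed: Replaces the pop-one-element-at-a-time while-loop building rep_info via insert(0, ...) with a single forward scan that records the last '{' position followed by one slice/join (and one del for the same mutation).
import Mathlib
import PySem

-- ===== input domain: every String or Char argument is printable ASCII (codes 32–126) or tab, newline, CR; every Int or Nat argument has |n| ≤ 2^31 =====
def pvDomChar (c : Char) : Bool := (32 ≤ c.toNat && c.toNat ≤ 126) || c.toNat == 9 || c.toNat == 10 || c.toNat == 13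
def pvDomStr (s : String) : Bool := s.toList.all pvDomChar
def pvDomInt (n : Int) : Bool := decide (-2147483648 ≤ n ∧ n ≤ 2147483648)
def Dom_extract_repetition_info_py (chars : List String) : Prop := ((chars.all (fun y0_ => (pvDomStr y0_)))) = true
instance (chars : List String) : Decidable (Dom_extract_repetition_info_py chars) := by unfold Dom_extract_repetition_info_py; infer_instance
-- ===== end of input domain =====

-- B replaces A's pop-one-at-a-time loop by a forward scan for the last '{' plus one slice
-- (idiomatic; equivalence proved about the RETURN value only — both Pythons mutate `chars` identically).


-- ===== PORT A =====
-- while chars: char = chars.pop(); if char == '{': break; rep_info.insert(0, char)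
-- popping from the end = walking chars.reverse head-first; insert(0, char) = cons onto rep_info.
def pvLoopA : List String → List String → List String
  | [], repInfo => repInfo
  | c :: rest, repInfo => if c == "{" then repInfo else pvLoopA rest (c :: repInfo)

def extract_repetition_info_py (chars : List String) : String :=
  PySem.Str.join "" (pvLoopA chars.reverse [])

-- ===== PORT B =====
-- forward scan recording the position of the last '{' (pos = None / pos = i)
def pvLastBrace (chars : List String) : Option Int :=
  (PySem.List.enumerate chars).foldl (fun pos p => if p.2 == "{" then some p.1 else pos) none

def extract_repetition_info_py_alt (chars : List String) : String :=
  match pvLastBrace chars with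
  | none => PySem.Str.join "" chars
  | some p => PySem.Str.join "" (PySem.List.slice chars (some (p + 1)) none)

-- ===== PRECONDITION & SPEC =====
def Spec_extract_repetition_info_py (chars : List String) (out : String) : Prop := out = extract_repetition_info_py_alt chars
instance (chars : List String) (out : String) : Decidable (Spec_extract_repetition_info_py chars out) := by unfold Spec_extract_repetition_info_py; infer_instance

-- ===== CLAIM (what is proved, stated in full; the proofs are below) =====
def Claim_equal_extract_repetition_info_py : Prop := ∀ (chars : List String), Dom_extract_repetition_info_py chars → Spec_extract_repetition_info_py chars (extract_repetition_info_py chars)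

-- ===== LEMMAS AND PROOFS =====

lemma pvLoopA_acc (l acc : List String) : pvLoopA l acc = pvLoopA l [] ++ acc := by
  induction l generalizing acc with
  | nil => simp [pvLoopA]
  | cons c rest ih =>
    by_cases h : c == "{" <;> simp [pvLoopA, h]
    rw [ih (c :: acc), ih [c]]
    simp

lemma pvLastBrace_append (ys : List String) (c : String) :
    pvLastBrace (ys ++ [c]) = if c == "{" then some (ys.length : Int) else pvLastBrace ys := by
  unfold pvLastBrace
  rw [PySem.List.enumerate_append, List.foldl_append]
  simp [PySem.List.enumerate]

lemma pvLastBrace_spec (chars : List String) :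
    pvLastBrace chars = none ∨ ∃ k : Nat, k < chars.length ∧ pvLastBrace chars = some (k : Int) := by
  induction chars using List.reverseRecOn with
  | nil => left; rfl
  | append_singleton ys c ih =>
    rw [pvLastBrace_append]
    by_cases h : c == "{"
    · right; exact ⟨ys.length, by simp [h]⟩
    · simp only [h]
      rcases ih with h0 | ⟨k, hk, hs⟩
      · left; exact h0
      · right; exact ⟨k, by simp [hs]; omega⟩

lemma pvListEq (chars : List String) :
    pvLoopA chars.reverse [] =
      (match pvLastBrace chars with
       | none => chars
       | some p => PySem.List.slice chars (some (p + 1)) none) := by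
  induction chars using List.reverseRecOn with
  | nil => rfl
  | append_singleton ys c ih =>
    rw [List.reverse_append]
    simp only [List.reverse_cons, List.reverse_nil, List.nil_append, List.singleton_append]
    rw [pvLastBrace_append]
    by_cases h : c == "{"
    · simp only [h, if_true, pvLoopA]
      have : ((ys.length : Int) + 1) = ((ys.length + 1 : Nat) : Int) := by push_cast; ring
      rw [this, PySem.List.slice_from_natCast]
      simp
    · have hb : (c == "{") = false := by simpa using h
      simp only [pvLoopA, hb, Bool.false_eq_true, if_false]
      rw [pvLoopA_acc, ih]
      rcases pvLastBrace_spec ys with h0 | ⟨k, hk, hs⟩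
      · simp [h0]
      · simp only [hs]
        have hcast : ((k : Int) + 1) = ((k + 1 : Nat) : Int) := by push_cast; ring
        rw [hcast, PySem.List.slice_from_natCast, PySem.List.slice_from_natCast,
          List.drop_append_of_le_length (by omega)]

-- ===== VERDICT (by name: the statement is the Claim_ definition above) =====
theorem extract_repetition_info_py_spec : Claim_equal_extract_repetition_info_py := by
  intro chars _
  unfold Spec_extract_repetition_info_py extract_repetition_info_py extract_repetition_info_py_alt
  rw [pvListEq chars]
  rcases pvLastBrace chars with _ | p <;> rfl
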